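-- pv_equiv track=rewrite | github.com/DiamondLightSource/nexgen | src/nexgen/command_line/cli_utils.py | find_grid_scan_axes
-- ===== SOURCE A (Python) =====
-- from typing import Any, Dict, List, Tuple
--
-- def find_grid_scan_axes(
--     axes_names: List,
--     axes_starts: List,
--     axes_ends: List,
--     axes_types: List,
-- ) -> List[str]:
--     """
--     Identify the scan axes for a linear/grid scan.
--
--     Args:
--         axes_names (List): List of names associated to goniometer axes.
--         axes_starts (List): List of start values.
--         axes_ends (List): List of end values.
--         axes_types (List): List of axes types, useful to identify only the translation axes.
--
--     Raises:
--         ValueError: If no axes have been passed.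
--
--     Returns:
--         scan_axis (List[str]): List of strings identifying the linear/grid scan axes. If no axes are identified, it will return an empty list.
--     """
--     if len(axes_names) == 0:
--         raise ValueError(
--             "Impossible to determine translation scan. No axes passed to find_grid_scan_axes function. Please make sure at least one value is passed."
--         )
--
--     # Look only at translation axes
--     grid_idx = [i for i in range(len(axes_names)) if axes_types[i] == "translation"]
--     axes_names = [axes_names[j] for j in grid_idx]
--     axes_starts = [axes_starts[j] for j in grid_idx]
--     axes_ends = [axes_ends[j] for j in grid_idx]
--
--     scan_axis = []
--     for n, ax in enumerate(axes_names):
--         if axes_starts[n] != axes_ends[n]: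
--             scan_axis.append(ax)
--     return scan_axis
-- ===== SOURCE B (Python) =====
-- def find_grid_scan_axes(
--     axes_names,
--     axes_starts,
--     axes_ends,
--     axes_types,
-- ):
--     """Single fused scan: no index table, no intermediate filtered copies."""
--     if len(axes_names) == 0:
--         raise ValueError(
--             "Impossible to determine translation scan. No axes passed to find_grid_scan_axes function. Please make sure at least one value is passed."
--         )
--     scan_axis = []
--     for i in range(len(axes_names)):
--         if axes_types[i] == "translation" and axes_starts[i] != axes_ends[i]:
--             scan_axis.append(axes_names[i])
--     return scan_axis
-- ===== Notes on version B (the rewrite author's own statement) =====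
-- stated objective: simpler
-- what changed: Replaces the index-list plus three filtering comprehensions plus a final indexed loop (four passes and three intermediate lists) with one fused scan over the indices that tests both conditions and appends the name directly.
import Mathlib
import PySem

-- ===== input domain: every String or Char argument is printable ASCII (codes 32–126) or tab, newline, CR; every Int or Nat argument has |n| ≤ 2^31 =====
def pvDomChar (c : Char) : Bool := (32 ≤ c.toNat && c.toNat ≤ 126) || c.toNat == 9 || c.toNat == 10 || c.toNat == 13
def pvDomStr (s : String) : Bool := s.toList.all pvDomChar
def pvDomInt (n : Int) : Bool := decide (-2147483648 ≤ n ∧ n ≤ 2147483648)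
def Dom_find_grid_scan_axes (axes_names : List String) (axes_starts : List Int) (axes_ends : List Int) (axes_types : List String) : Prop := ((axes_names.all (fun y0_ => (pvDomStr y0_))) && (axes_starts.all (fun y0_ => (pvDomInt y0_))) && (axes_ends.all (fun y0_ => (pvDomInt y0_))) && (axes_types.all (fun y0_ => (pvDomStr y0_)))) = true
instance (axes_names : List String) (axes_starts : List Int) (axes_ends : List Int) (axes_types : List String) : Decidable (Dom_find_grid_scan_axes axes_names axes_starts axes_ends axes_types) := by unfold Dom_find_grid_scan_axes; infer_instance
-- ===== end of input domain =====

-- B replaces A's index table + three filtering comprehensions + final indexed loop with one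
-- fused scan over the indices (objective: simpler); return values are proved equal on Pre_.

-- ===== PORT A =====
-- Literal transliteration of A: the empty-input guard (the Python raises ValueError there,
-- excluded by Pre_), the translation index list, the three filtered copies, then the
-- enumerate loop indexing the copies.
def find_grid_scan_axes (axes_names : List String) (axes_starts : List Int) (axes_ends : List Int) (axes_types : List String) : List String :=
  if axes_names.length = 0 then []  -- Python raises ValueError here; outside Pre_
  else
    let grid_idx : List Int :=
      (PySem.List.pyRange 0 axes_names.length 1).filter
        (fun i => PySem.List.pyGetD axes_types i "" == "translation")
    let names' := grid_idx.map (fun j => PySem.List.pyGetD axes_names j "")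
    let starts' := grid_idx.map (fun j => PySem.List.pyGetD axes_starts j 0)
    let ends' := grid_idx.map (fun j => PySem.List.pyGetD axes_ends j 0)
    (PySem.List.enumerate names' 0).foldl
      (fun scan_axis p =>
        if PySem.List.pyGetD starts' p.1 0 ≠ PySem.List.pyGetD ends' p.1 0
        then scan_axis ++ [p.2] else scan_axis) []

-- ===== PORT B =====
-- Literal transliteration of B: the same guard, then one pass over range(len(axes_names))
-- testing both conditions and appending the name directly.
def find_grid_scan_axes_alt (axes_names : List String) (axes_starts : List Int) (axes_ends : List Int) (axes_types : List String) : List String :=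
  if axes_names.length = 0 then []  -- Python raises ValueError here; outside Pre_
  else
    (PySem.List.pyRange 0 axes_names.length 1).foldl
      (fun scan_axis i =>
        if PySem.List.pyGetD axes_types i "" == "translation"
            && !(PySem.List.pyGetD axes_starts i 0 == PySem.List.pyGetD axes_ends i 0)
        then scan_axis ++ [PySem.List.pyGetD axes_names i ""] else scan_axis) []

-- ===== PRECONDITION & SPEC =====
-- Pre_ excludes exactly the inputs where the Python A raises: empty axes_names (ValueError),
-- a types list shorter than names (IndexError), and a translation index out of range of
-- starts or ends (IndexError). B raises in exactly the same situations.
def Pre_find_grid_scan_axes (axes_names : List String) (axes_starts : List Int) (axes_ends : List Int) (axes_types : List String) : Prop :=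
  axes_names ≠ [] ∧
  axes_names.length ≤ axes_types.length ∧
  ∀ i : Nat, i < axes_names.length → axes_types.getD i "" = "translation" →
    i < axes_starts.length ∧ i < axes_ends.length
instance (axes_names : List String) (axes_starts : List Int) (axes_ends : List Int) (axes_types : List String) : Decidable (Pre_find_grid_scan_axes axes_names axes_starts axes_ends axes_types) := by unfold Pre_find_grid_scan_axes; infer_instance

def pvWitness_find_grid_scan_axes : List String × List Int × List Int × List String :=
  (["omega", "sam_x", "sam_y"], [0, 0, 1], [0, 2, 1], ["rotation", "translation", "translation"])

def Spec_find_grid_scan_axes (axes_names : List String) (axes_starts : List Int) (axes_ends : List Int) (axes_types : List String) (out : List String) : Prop := out = find_grid_scan_axes_alt axes_names axes_starts axes_ends axes_types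
instance (axes_names : List String) (axes_starts : List Int) (axes_ends : List Int) (axes_types : List String) (out : List String) : Decidable (Spec_find_grid_scan_axes axes_names axes_starts axes_ends axes_types out) := by unfold Spec_find_grid_scan_axes; infer_instance

-- ===== CLAIM (what is proved, stated in full; the proofs are below) =====
def Claim_equal_find_grid_scan_axes : Prop := ∀ (axes_names : List String) (axes_starts : List Int) (axes_ends : List Int) (axes_types : List String), Dom_find_grid_scan_axes axes_names axes_starts axes_ends axes_types → Pre_find_grid_scan_axes axes_names axes_starts axes_ends axes_types → Spec_find_grid_scan_axes axes_names axes_starts axes_ends axes_types (find_grid_scan_axes axes_names axes_starts axes_ends axes_types)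

-- ===== LEMMAS AND PROOFS =====

theorem pyRange_zero_len (n : Nat) :
    PySem.List.pyRange 0 n 1 = (List.range n).map (fun k : Nat => (k : Int)) := by
  rw [PySem.List.pyRange_one]
  simp only [Int.sub_zero, Int.toNat_natCast, zero_add]

-- A's final loop, with the filtered lists written as maps over (pre ++ g): as the loop
-- walks the suffix g, the running enumerate index equals the consumed prefix's length.
theorem loopA_suffix (st en : Nat → Int) (nm : Nat → String) :
    ∀ (g pre : List Nat) (acc : List String),
      (PySem.List.enumerate (g.map nm) (pre.length : Int)).foldl
        (fun scan_axis p =>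
          if PySem.List.pyGetD ((pre ++ g).map st) p.1 0 ≠ PySem.List.pyGetD ((pre ++ g).map en) p.1 0
          then scan_axis ++ [p.2] else scan_axis) acc
      = acc ++ (g.filter (fun j => decide (st j ≠ en j))).map nm := by
  intro g
  induction g with
  | nil => intro pre acc; simp
  | cons j rest ih =>
    intro pre acc
    have hst : PySem.List.pyGetD ((pre ++ j :: rest).map st) (pre.length : Int) 0 = st j := by
      rw [PySem.List.pyGetD_natCast]
      have : (pre.map st ++ (j :: rest).map st).getD pre.length 0 = st j := by
        simp [List.getD]
      simpa using this
    have hen : PySem.List.pyGetD ((pre ++ j :: rest).map en) (pre.length : Int) 0 = en j := by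
      rw [PySem.List.pyGetD_natCast]
      have : (pre.map en ++ (j :: rest).map en).getD pre.length 0 = en j := by
        simp [List.getD]
      simpa using this
    have hrec := ih (pre ++ [j])
    simp only [List.append_assoc, List.singleton_append] at hrec
    have hlen : (pre.length : Int) + 1 = ((pre ++ [j]).length : Int) := by simp
    simp only [List.map_cons, PySem.List.enumerate_cons, List.foldl_cons, hst, hen, hlen, hrec]
    by_cases h : st j = en j <;> simp [h]

theorem loopA_top (st en : Nat → Int) (nm : Nat → String) (g : List Nat) :
    (PySem.List.enumerate (g.map nm) 0).foldl
        (fun scan_axis p =>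
          if PySem.List.pyGetD (g.map st) p.1 0 ≠ PySem.List.pyGetD (g.map en) p.1 0
          then scan_axis ++ [p.2] else scan_axis) []
      = (g.filter (fun j => decide (st j ≠ en j))).map nm := by
  have h := loopA_suffix st en nm g [] []
  simp only [List.nil_append] at h
  exact h

theorem find_grid_scan_axes_spec_aux (axes_names : List String) (axes_starts : List Int) (axes_ends : List Int) (axes_types : List String) :
    find_grid_scan_axes axes_names axes_starts axes_ends axes_types
      = find_grid_scan_axes_alt axes_names axes_starts axes_ends axes_types := by
  unfold find_grid_scan_axes find_grid_scan_axes_alt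
  by_cases hnil : axes_names.length = 0
  · simp [hnil]
  · simp only [hnil, if_false, pyRange_zero_len]
    rw [List.filter_map]
    simp only [List.map_map, List.foldl_map, Function.comp_def, PySem.List.pyGetD_natCast]
    rw [loopA_top (fun j => axes_starts.getD j 0) (fun j => axes_ends.getD j 0)
          (fun j => axes_names.getD j "")]
    rw [PySem.List.foldl_append_if
          (fun k => axes_types.getD k "" == "translation" && !(axes_starts.getD k 0 == axes_ends.getD k 0))
          (fun k => axes_names.getD k "")]
    rw [List.filter_filter]
    simp only [List.nil_append]
    apply congrArg
    apply List.filter_congr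
    intro j _
    by_cases he : axes_starts[j]?.getD 0 = axes_ends[j]?.getD 0 <;> simp [he, Bool.and_comm]

-- ===== VERDICT (by name: the statement is the Claim_ definition above) =====
theorem find_grid_scan_axes_spec : Claim_equal_find_grid_scan_axes := by
  intro axes_names axes_starts axes_ends axes_types _ _
  exact find_grid_scan_axes_spec_aux axes_names axes_starts axes_ends axes_types
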